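-- pv_equiv track=rewrite | github.com/han9369/star-api | synastry_service/nakshatra.py | check_rajju_dosha
-- ===== SOURCE A (Python) =====
-- NAKSHATRA_PROPERTIES = {
--     # Gana (气质类型): Deva(神性), Manushya(人性), Rakshasa(罗刹)
--     "GANA": {
--         "DEVA": [1, 5, 7, 8, 13, 15, 17, 22, 27],   # 神性: 忠诚、开放、奉献
--         "MANUSHYA": [2, 4, 6, 11, 12, 20, 21, 25, 26], # 人性: 实用、进步
--         "RAKSHASA": [3, 9, 10, 14, 16, 18, 19, 23, 24]  # 罗刹: 独立、超然、打破常规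
--     },
--     # Nadi (能量通道): Vata(风), Pitta(火), Kapha(水)
--     "NADI": {
--         "VATA": [1, 6, 7, 12, 13, 18, 19, 24, 25], # 风: 轻盈、变化、干燥
--         "PITTA": [2, 5, 8, 11, 14, 17, 20, 23, 26], # 火: 热情、转化、强度
--         "KAPHA": [3, 4, 9, 10, 15, 16, 21, 22, 27]  # 水: 冷静、稳定、滋养
--     },
--     # Yoni (动物属性): 动物对应星宿的本能性质
--     "YONI": {
--         "HORSE_MALE": [1],
--         "ELEPHANT_MALE": [2],
--         "SHEEP_FEMALE": [3],
--         "SNAKE_MALE": [4],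
--         "SNAKE_FEMALE": [5],
--         "DOG_FEMALE": [6],
--         "CAT_FEMALE": [7],
--         "SHEEP_MALE": [8],
--         "CAT_MALE": [9],
--         "RAT_MALE": [10],
--         "RAT_FEMALE": [11],
--         "COW_MALE": [12],
--         "BUFFALO_FEMALE": [13],
--         "TIGER_FEMALE": [14],
--         "BUFFALO_MALE": [15],
--         "TIGER_MALE": [16],
--         "HARE_FEMALE": [17],
--         "HARE_MALE": [18],
--         "DOG_MALE": [19],
--         "MONKEY_MALE": [20],
--         "MONGOOSE_MALE": [21],
--         "MONKEY_FEMALE": [22],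
--         "LION_FEMALE": [23],
--         "HORSE_FEMALE": [24],
--         "LION_MALE": [25],
--         "COW_FEMALE": [26],
--         "ELEPHANT_FEMALE": [27]
--     },
--     # Rajju (身体部位): 用于检测Rajju Dosha
--     "RAJJU": {
--         "FEET": [1, 9, 10, 18, 19, 27], # 脚
--         "HIP": [2, 8, 11, 17, 20, 26],  # 臀部
--         "NECK": [3, 7, 12, 16, 21, 25], # 颈部
--         "NAVEL": [4, 6, 13, 15, 22, 24], # 肚脐
--         "HEAD": [5, 14, 23]  # 头部
--     },
--     # Vedha (障碍): 互相阻碍的星宿对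
--     "VEDHA": {
--         1: [18],  # Ashwini & Jyeshtha
--         2: [17],  # Bharani & Anuradha
--         3: [16],  # Krittika & Vishakha
--         4: [15],  # Rohini & Swati
--         5: [14, 23],  # Mrigashira & Chitra & Dhanishta
--         6: [22],  # Ardra & Shravana
--         7: [21],  # Punarvasu & Uttarashada
--         8: [20],  # Pushya & Purvashada
--         9: [19],  # Ashlesha & Mula
--         10: [27],  # Magha & Revati
--         11: [26],  # Purva Phalguni & Uttarabhadrapada
--         12: [25],  # Uttara Phalguni & Purvabhadrapada
--         13: [24],  # Hasta & Shatabhisha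
--         14: [5, 23],  # Chitra & Mrigashira & Dhanishta
--         15: [4],  # Swati & Rohini
--         16: [3],  # Vishakha & Krittika
--         17: [2],  # Anuradha & Bharani
--         18: [1],  # Jyeshtha & Ashwini
--         19: [9],  # Mula & Ashlesha
--         20: [8],  # Purva Ashadha & Pushya
--         21: [7],  # Uttara Ashadha & Punarvasu
--         22: [6],  # Shravana & Ardra
--         23: [5, 14],  # Dhanishta & Mrigashira & Chitra
--         24: [13],  # Shatabhisha & Hasta
--         25: [12],  # Purva Bhadrapada & Uttara Phalguni
--         26: [11],  # Uttara Bhadrapada & Purva Phalguni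
--         27: [10]   # Revati & Magha
--     }
-- }
--
-- def check_rajju_dosha(nakshatra1, nakshatra2):
--     """检查是否有Rajju Dosha（身体部位冲突）"""
--     # 获取每个星宿对应的身体部位
--     rajju1 = None
--     rajju2 = None
--
--     for body_part, nakshatras in NAKSHATRA_PROPERTIES["RAJJU"].items():
--         if nakshatra1 in nakshatras:
--             rajju1 = body_part
--         if nakshatra2 in nakshatras:
--             rajju2 = body_part
--
--     # 如果两个星宿对应相同的身体部位，则有Rajju Dosha
--     return rajju1 == rajju2
-- ===== SOURCE B (Python) =====
-- def _rajju_index(n):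
--     """Rajju body-part index via the classical zigzag: nakshatras 1..27 ascend
--     FEET->HIP->NECK->NAVEL->HEAD and descend back, period 9; index = min(r, 8-r)
--     for r = (n-1) % 9. Outside 1..27 there is no nakshatra, hence no body part."""
--     if 1 <= n <= 27:
--         r = (n - 1) % 9
--         return min(r, 8 - r)
--     return None
--
-- def check_rajju_dosha(nakshatra1, nakshatra2):
--     return _rajju_index(nakshatra1) == _rajju_index(nakshatra2)
-- ===== Notes on version B (the rewrite author's own statement) =====
-- stated objective: alternative
-- what changed: Drops the body-part table entirely: the RAJJU grouping is the classical zigzag of period 9 (ascend 5 parts, descend back), so B computes the body-part index by the closed form min(r, 8-r) with r = (n-1) % 9 for n in 1..27 (None outside) and compares the two indices, instead of scanning the five table lists per call.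
import Mathlib
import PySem

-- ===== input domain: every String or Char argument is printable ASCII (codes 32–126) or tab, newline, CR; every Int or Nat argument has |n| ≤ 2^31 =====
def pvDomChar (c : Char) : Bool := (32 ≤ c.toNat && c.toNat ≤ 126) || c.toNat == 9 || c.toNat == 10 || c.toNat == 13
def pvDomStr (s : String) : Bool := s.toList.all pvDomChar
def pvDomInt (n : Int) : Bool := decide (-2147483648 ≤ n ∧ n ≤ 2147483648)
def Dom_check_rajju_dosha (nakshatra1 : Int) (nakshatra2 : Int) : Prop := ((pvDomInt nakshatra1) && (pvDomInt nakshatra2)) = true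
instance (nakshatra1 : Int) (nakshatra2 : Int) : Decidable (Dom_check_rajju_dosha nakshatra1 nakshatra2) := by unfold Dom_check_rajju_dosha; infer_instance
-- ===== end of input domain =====

-- B replaces A's per-call scan over the five body-part lists by the closed-form
-- zigzag arithmetic min(r, 8-r), r = (n-1) % 9, dropping the table entirely
-- (objective: alternative; return-value equivalence only).

-- ===== PORT A =====
-- NAKSHATRA_PROPERTIES["RAJJU"].items(), in insertion order
def rajjuItems : List (String × List Int) :=
  [("FEET",  [1, 9, 10, 18, 19, 27]),
   ("HIP",   [2, 8, 11, 17, 20, 26]),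
   ("NECK",  [3, 7, 12, 16, 21, 25]),
   ("NAVEL", [4, 6, 13, 15, 22, 24]),
   ("HEAD",  [5, 14, 23])]

def check_rajju_dosha (nakshatra1 : Int) (nakshatra2 : Int) : Bool :=
  -- the loop accumulating rajju1 and rajju2
  let st := rajjuItems.foldl
    (fun (st : Option String × Option String) bp =>
      let r1 := if bp.2.contains nakshatra1 then some bp.1 else st.1
      let r2 := if bp.2.contains nakshatra2 then some bp.1 else st.2
      (r1, r2))
    (none, none)
  st.1 == st.2

-- ===== PORT B =====
def rajjuIndex (n : Int) : Option Int :=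
  if 1 ≤ n ∧ n ≤ 27 then
    let r := PySem.Int.mod (n - 1) 9
    some (min r (8 - r))
  else none

def check_rajju_dosha_alt (nakshatra1 : Int) (nakshatra2 : Int) : Bool :=
  rajjuIndex nakshatra1 == rajjuIndex nakshatra2

-- ===== PRECONDITION & SPEC =====
def Spec_check_rajju_dosha (nakshatra1 : Int) (nakshatra2 : Int) (out : Bool) : Prop := out = check_rajju_dosha_alt nakshatra1 nakshatra2
instance (nakshatra1 : Int) (nakshatra2 : Int) (out : Bool) : Decidable (Spec_check_rajju_dosha nakshatra1 nakshatra2 out) := by unfold Spec_check_rajju_dosha; infer_instance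

-- ===== CLAIM =====
def Claim_equal_check_rajju_dosha : Prop := ∀ (nakshatra1 : Int) (nakshatra2 : Int), Dom_check_rajju_dosha nakshatra1 nakshatra2 → Spec_check_rajju_dosha nakshatra1 nakshatra2 (check_rajju_dosha nakshatra1 nakshatra2)

-- ===== LEMMAS AND PROOFS =====

-- index -> body-part name; A's accumulated string is this image of B's index
def idxStr (k : Int) : String :=
  if k = 0 then "FEET" else if k = 1 then "HIP" else if k = 2 then "NECK"
  else if k = 3 then "NAVEL" else "HEAD"

-- A's pair-state fold decomposes into two independent one-sided folds.
theorem fold_pair (l : List (String × List Int)) (n1 n2 : Int)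
    (a b : Option String) :
    l.foldl
      (fun (st : Option String × Option String) bp =>
        let r1 := if bp.2.contains n1 then some bp.1 else st.1
        let r2 := if bp.2.contains n2 then some bp.1 else st.2
        (r1, r2))
      (a, b)
    = (l.foldl (fun r bp => if bp.2.contains n1 then some bp.1 else r) a,
       l.foldl (fun r bp => if bp.2.contains n2 then some bp.1 else r) b) := by
  induction l generalizing a b with
  | nil => rfl
  | cons hd tl ih =>
    simp only [List.foldl]
    exact ih _ _

-- A's one-sided fold is the idxStr image of B's closed-form index.
set_option maxRecDepth 4000 in
theorem part_eq (n : Int) :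
    rajjuItems.foldl (fun r bp => if bp.2.contains n then some bp.1 else r) none
    = (rajjuIndex n).map idxStr := by
  by_cases h : 1 ≤ n ∧ n ≤ 27
  · obtain ⟨h1, h2⟩ := h
    interval_cases n <;> decide
  · rw [rajjuIndex, if_neg h]
    have c1 : n ≠ 1 := by omega
    have c2 : n ≠ 2 := by omega
    have c3 : n ≠ 3 := by omega
    have c4 : n ≠ 4 := by omega
    have c5 : n ≠ 5 := by omega
    have c6 : n ≠ 6 := by omega
    have c7 : n ≠ 7 := by omega
    have c8 : n ≠ 8 := by omega
    have c9 : n ≠ 9 := by omega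
    have c10 : n ≠ 10 := by omega
    have c11 : n ≠ 11 := by omega
    have c12 : n ≠ 12 := by omega
    have c13 : n ≠ 13 := by omega
    have c14 : n ≠ 14 := by omega
    have c15 : n ≠ 15 := by omega
    have c16 : n ≠ 16 := by omega
    have c17 : n ≠ 17 := by omega
    have c18 : n ≠ 18 := by omega
    have c19 : n ≠ 19 := by omega
    have c20 : n ≠ 20 := by omega
    have c21 : n ≠ 21 := by omega
    have c22 : n ≠ 22 := by omega
    have c23 : n ≠ 23 := by omega
    have c24 : n ≠ 24 := by omega
    have c25 : n ≠ 25 := by omega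
    have c26 : n ≠ 26 := by omega
    have c27 : n ≠ 27 := by omega
    simp [rajjuItems, List.foldl,
      c1, c2, c3, c4, c5, c6, c7, c8, c9, c10, c11, c12, c13, c14, c15, c16,
      c17, c18, c19, c20, c21, c22, c23, c24, c25, c26, c27]

-- B's index is none or in 0..4
theorem rajjuIndex_range (n : Int) :
    rajjuIndex n = none ∨ ∃ k, rajjuIndex n = some k ∧ 0 ≤ k ∧ k ≤ 4 := by
  rw [rajjuIndex]
  split
  · right
    refine ⟨_, rfl, ?_, ?_⟩ <;>
    · have h0 := PySem.Int.mod_nonneg (n - 1) (b := 9) (by omega)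
      have h1 := PySem.Int.mod_lt (n - 1) (b := 9) (by omega)
      omega
  · left; rfl

-- idxStr is injective on 0..4, lifted through Option.map and ==
theorem map_idx_beq (a b : Option Int)
    (ha : a = none ∨ ∃ k, a = some k ∧ 0 ≤ k ∧ k ≤ 4)
    (hb : b = none ∨ ∃ k, b = some k ∧ 0 ≤ k ∧ k ≤ 4) :
    (a.map idxStr == b.map idxStr) = (a == b) := by
  rcases ha with rfl | ⟨k, rfl, hk0, hk4⟩ <;>
    rcases hb with rfl | ⟨l, rfl, hl0, hl4⟩
  · rfl
  · rfl
  · rfl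
  · interval_cases k <;> interval_cases l <;> decide

-- ===== VERDICT =====
theorem check_rajju_dosha_spec : Claim_equal_check_rajju_dosha := by
  intro n1 n2 _
  unfold Spec_check_rajju_dosha check_rajju_dosha check_rajju_dosha_alt
  rw [fold_pair, part_eq, part_eq]
  exact map_idx_beq _ _ (rajjuIndex_range n1) (rajjuIndex_range n2)
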